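-- pv_equiv track=rewrite | github.com/abrahamboza/Blockchain_Marketplace_for_Ai_Applications | Blockchain/blockchain.py | validate_transaction
-- ===== SOURCE A (Python) =====
-- from typing import List, Dict, Any, Optional, Tuple
--
-- def validate_transaction(transaction: Dict) -> bool:
--     """
--     Validiert eine gegebene Transaktion
--     Erweitert um verschiedene Transaktionstypen
--
--     :param transaction: Zu validierende Transaktion
--     :return: True oder False
--     """
--     # Prüfe Transaktionstyp
--     if "type" not in transaction:
--         # Standard-Transaktion (Geldtransfer)
--         if not all(k in transaction for k in ("sender", "recipient", "amount", "timestamp", "signature")):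
--             return False
--     elif transaction["type"] == "data_upload":
--         if not all(k in transaction for k in ("owner", "metadata", "price", "timestamp", "signature")):
--             return False
--     elif transaction["type"] == "model_upload":
--         if not all(k in transaction for k in ("owner", "metadata", "price", "timestamp", "signature")):
--             return False
--     elif transaction["type"] == "data_purchase":
--         if not all(k in transaction for k in ("buyer", "seller", "data_id", "amount", "timestamp", "signature")):
--             return False
--     elif transaction["type"] == "model_purchase":
--         if not all(k in transaction for k in ("buyer", "seller", "model_id", "amount", "timestamp", "signature")):
--             return False
--     else:
--         # Unbekannter Transaktionstyp
--         return False
--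
--     # Hier könnten weitere Validierungen hinzugefügt werden, z.B.:
--     # - Überprüfung der Signatur
--     # - Überprüfung des Guthabens des Käufers
--     # - Überprüfung, ob die Daten/Modelle existieren
--
--     return True
-- ===== SOURCE B (Python) =====
-- def validate_transaction(transaction):
--     # Inverted check: pick the pending required-key set, then make ONE pass over
--     # the transaction's own keys, discarding each from the set, succeeding as
--     # soon as the set empties (A instead scans the dict once per required key).
--     if "type" not in transaction:
--         pending = {"sender", "recipient", "amount", "timestamp", "signature"}
--     else:
--         t = transaction["type"]
--         if t == "data_upload" or t == "model_upload":
--             pending = {"owner", "metadata", "price", "timestamp", "signature"}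
--         elif t == "data_purchase":
--             pending = {"buyer", "seller", "data_id", "amount", "timestamp", "signature"}
--         elif t == "model_purchase":
--             pending = {"buyer", "seller", "model_id", "amount", "timestamp", "signature"}
--         else:
--             return False
--     for k in transaction:
--         pending.discard(k)
--         if not pending:
--             return True
--     return False
-- ===== Notes on version B (the rewrite author's own statement) =====
-- stated objective: alternative
-- what changed: Inverted the traversal: instead of scanning the dict once per required key with all(k in transaction ...), B selects a pending required-key set and makes a single pass over the transaction's own keys, discarding each from the set and returning True as soon as it empties.
import Mathlib
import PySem

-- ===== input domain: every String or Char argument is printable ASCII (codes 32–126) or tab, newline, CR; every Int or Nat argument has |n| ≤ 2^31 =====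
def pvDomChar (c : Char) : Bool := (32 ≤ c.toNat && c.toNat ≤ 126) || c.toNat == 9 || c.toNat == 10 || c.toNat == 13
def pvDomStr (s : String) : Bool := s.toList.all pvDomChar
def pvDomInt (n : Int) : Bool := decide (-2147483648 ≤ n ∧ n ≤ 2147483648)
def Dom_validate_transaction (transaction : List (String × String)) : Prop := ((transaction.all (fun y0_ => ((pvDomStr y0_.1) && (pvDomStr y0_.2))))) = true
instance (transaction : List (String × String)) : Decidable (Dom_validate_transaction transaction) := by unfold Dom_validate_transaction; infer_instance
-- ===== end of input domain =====

-- B inverts A's traversal: instead of scanning the dict once per required key, B makes ONE pass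
-- over the transaction's own keys, discarding each from a pending required-key set and succeeding
-- as soon as it empties (alternative decomposition, same asymptotic cost).
-- ===== PORT A =====
def pyHasKey (d : List (String × String)) (k : String) : Bool :=
  ((PySem.Dict.mk d).get? k).isSome

def validate_transaction (transaction : List (String × String)) : Bool :=
  if !(pyHasKey transaction "type") then
    if !(["sender", "recipient", "amount", "timestamp", "signature"].all (pyHasKey transaction)) then
      false
    else true
  else if ((PySem.Dict.mk transaction).get? "type").getD "" == "data_upload" then
    if !(["owner", "metadata", "price", "timestamp", "signature"].all (pyHasKey transaction)) then
      false
    else true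
  else if ((PySem.Dict.mk transaction).get? "type").getD "" == "model_upload" then
    if !(["owner", "metadata", "price", "timestamp", "signature"].all (pyHasKey transaction)) then
      false
    else true
  else if ((PySem.Dict.mk transaction).get? "type").getD "" == "data_purchase" then
    if !(["buyer", "seller", "data_id", "amount", "timestamp", "signature"].all (pyHasKey transaction)) then
      false
    else true
  else if ((PySem.Dict.mk transaction).get? "type").getD "" == "model_purchase" then
    if !(["buyer", "seller", "model_id", "amount", "timestamp", "signature"].all (pyHasKey transaction)) then
      false
    else true
  else
    false

-- ===== PORT B =====
-- the 'for k in transaction: pending.discard(k); if not pending: return True' loop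
def bLoop : List String → PySem.Set String → Bool
  | [], _ => false
  | k :: ks, pending =>
      let p := PySem.Set.discard pending k
      if p.isEmpty then true else bLoop ks p

def validate_transaction_alt (transaction : List (String × String)) : Bool :=
  let d := PySem.Dict.mk transaction
  match d.get? "type" with
  | none =>
      bLoop d.keys (PySem.Set.ofList ["sender", "recipient", "amount", "timestamp", "signature"])
  | some t =>
      if t == "data_upload" || t == "model_upload" then
        bLoop d.keys (PySem.Set.ofList ["owner", "metadata", "price", "timestamp", "signature"])
      else if t == "data_purchase" then
        bLoop d.keys (PySem.Set.ofList ["buyer", "seller", "data_id", "amount", "timestamp", "signature"])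
      else if t == "model_purchase" then
        bLoop d.keys (PySem.Set.ofList ["buyer", "seller", "model_id", "amount", "timestamp", "signature"])
      else
        false

-- ===== PRECONDITION & SPEC =====
def Spec_validate_transaction (transaction : List (String × String)) (out : Bool) : Prop := out = validate_transaction_alt transaction
instance (transaction : List (String × String)) (out : Bool) : Decidable (Spec_validate_transaction transaction out) := by unfold Spec_validate_transaction; infer_instance

-- ===== CLAIM (what is proved, stated in full; the proofs are below) =====
def Claim_equal_validate_transaction : Prop := ∀ (transaction : List (String × String)), Dom_validate_transaction transaction → Spec_validate_transaction transaction (validate_transaction transaction)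

-- ===== LEMMAS AND PROOFS =====
theorem bLoop_eq_true_iff (ks : List String) : ∀ p : PySem.Set String, p ≠ [] →
    (bLoop ks p = true ↔ ∀ x ∈ p, x ∈ ks) := by
  induction ks with
  | nil =>
    intro p hp
    simp only [bLoop]
    constructor
    · intro h; exact absurd h (by simp)
    · intro h
      cases p with
      | nil => exact absurd rfl hp
      | cons a as => exact absurd (h a (by simp)) (by simp)
  | cons k ks ih =>
    intro p hp
    simp only [bLoop]
    by_cases he : (PySem.Set.discard p k).isEmpty = true
    · rw [if_pos he]
      have hsub : ∀ x ∈ p, x = k := by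
        intro x hx
        by_contra hne
        have hm : x ∈ PySem.Set.discard p k := (PySem.Set.mem_discard _ _ _).2 ⟨hx, hne⟩
        rw [List.isEmpty_iff] at he
        simp [he] at hm
      simp only [true_iff]
      intro x hx
      simp [hsub x hx]
    · have hne : PySem.Set.discard p k ≠ [] := by
        intro hnil; rw [hnil] at he; simp at he
      rw [if_neg he, ih _ hne]
      constructor
      · intro h x hx
        by_cases hxk : x = k
        · simp [hxk]
        · have := h x ((PySem.Set.mem_discard _ _ _).2 ⟨hx, hxk⟩)
          simp [this]
      · intro h x hx
        obtain ⟨hxp, hxk⟩ := (PySem.Set.mem_discard _ _ _).1 hx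
        have := h x hxp
        simp only [List.mem_cons] at this
        exact this.resolve_left hxk

theorem all_eq_bLoop (t : List (String × String)) (req : List String) (h : req ≠ []) :
    req.all (pyHasKey t) = bLoop (PySem.Dict.mk t).keys (PySem.Set.ofList req) := by
  have hne : PySem.Set.ofList req ≠ [] := by
    cases req with
    | nil => exact absurd rfl h
    | cons a as => simp [PySem.Set.ofList_cons]
  rw [Bool.eq_iff_iff, bLoop_eq_true_iff _ _ hne]
  simp only [List.all_eq_true, PySem.Set.mem_ofList, pyHasKey]
  constructor
  · intro hall x hx
    have := hall x hx
    rw [← PySem.Dict.contains_eq_isSome_get?, PySem.Dict.contains_eq_decide_mem_keys] at this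
    exact of_decide_eq_true this
  · intro hall x hx
    rw [← PySem.Dict.contains_eq_isSome_get?, PySem.Dict.contains_eq_decide_mem_keys]
    exact decide_eq_true (hall x hx)

-- ===== VERDICT (by name: the statement is the Claim_ definition above) =====
theorem validate_transaction_spec : Claim_equal_validate_transaction := by
  intro t _
  unfold Spec_validate_transaction validate_transaction validate_transaction_alt
  rw [all_eq_bLoop t ["sender", "recipient", "amount", "timestamp", "signature"] (by simp),
      all_eq_bLoop t ["owner", "metadata", "price", "timestamp", "signature"] (by simp),
      all_eq_bLoop t ["buyer", "seller", "data_id", "amount", "timestamp", "signature"] (by simp),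
      all_eq_bLoop t ["buyer", "seller", "model_id", "amount", "timestamp", "signature"] (by simp)]
  cases h : (PySem.Dict.mk t).get? "type" with
  | none =>
    simp only [pyHasKey, h, Option.isSome_none, Bool.not_false, if_true]
    cases hb : bLoop (PySem.Dict.mk t).keys
        (PySem.Set.ofList ["sender", "recipient", "amount", "timestamp", "signature"]) <;> simp
  | some tv =>
    simp only [pyHasKey, h, Option.isSome_some, Bool.not_true, Bool.false_eq_true, if_false,
      Option.getD_some]
    by_cases h1 : tv = "data_upload"
    · simp [h1]
    · by_cases h2 : tv = "model_upload"
      · simp [h2]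
      · by_cases h3 : tv = "data_purchase"
        · simp [h3]
        · by_cases h4 : tv = "model_purchase"
          · simp [h4]
          · simp [h1, h2, h3, h4]
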